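-- pv_equiv track=rewrite | github.com/CelestialPaler/NexusPlatform | nexus-platform/backend/ba_analysis/core.py | _format_bitmap
-- ===== SOURCE A (Python) =====
-- def _format_bitmap(bitmap_int):
--     bits = []
--     for i in range(64):
--         bit_val = (bitmap_int >> i) & 1
--         if i > 0 and i % 8 == 0:
--             bits.append(' ')
--         bits.append('1' if bit_val else '.')
--     return "".join(bits)
-- ===== SOURCE B (Python) =====
-- def _format_bitmap(bitmap_int):
--     rev = format(bitmap_int & ((1 << 64) - 1), '064b')[::-1].replace('0', '.')
--     return ' '.join(rev[i:i + 8] for i in range(0, 64, 8))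
-- ===== Notes on version B (the rewrite author's own statement) =====
-- stated objective: idiomatic
-- what changed: B replaces A's per-bit extraction loop with interleaved space appends by one binary string formatting of the masked value, a reversal, a zero-to-dot translation, and a join of fixed-width byte chunks.
import Mathlib
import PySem

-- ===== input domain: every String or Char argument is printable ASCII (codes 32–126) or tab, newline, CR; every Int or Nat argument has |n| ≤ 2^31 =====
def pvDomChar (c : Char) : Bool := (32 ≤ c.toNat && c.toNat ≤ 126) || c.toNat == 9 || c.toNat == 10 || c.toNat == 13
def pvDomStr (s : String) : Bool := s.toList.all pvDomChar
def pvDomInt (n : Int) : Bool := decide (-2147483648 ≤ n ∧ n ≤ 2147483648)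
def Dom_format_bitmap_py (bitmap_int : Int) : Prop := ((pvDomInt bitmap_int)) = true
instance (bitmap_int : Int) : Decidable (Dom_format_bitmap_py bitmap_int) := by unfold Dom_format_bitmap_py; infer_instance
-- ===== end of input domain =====

-- B formats the masked 64-bit value as one binary string, reverses it and joins fixed 8-char chunks,
-- instead of A's bit-by-bit loop with interleaved spaces; objective: idiomatic, same cost.

-- ===== PORT A =====
-- Python's 'x >> i' on int is Lean's 'x >>> i' (arithmetic shift, exact on negatives); 'v & 1' is PySem.Int.band v 1.
def format_bitmap_py (bitmap_int : Int) : String :=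
  String.ofList ((List.range 64).foldl (fun (bits : List Char) (i : Nat) =>
      (if 0 < i ∧ i % 8 = 0 then bits ++ [' '] else bits) ++
      [if PySem.Int.band (bitmap_int >>> i) 1 ≠ 0 then '1' else '.']) [])

-- ===== PORT B =====
-- str.replace('0', '.') with single-character arguments is exactly a character map.
def pvTr (c : Char) : Char := if c = '0' then '.' else c
-- format(n, '064b'): the 64 binary digits of n, most significant first; exact for 0 ≤ n < 2^64.
def pvBin64 (n : Nat) : List Char := (List.range 64).map (fun k => if n.testBit (63 - k) then '1' else '0')

def format_bitmap_py_alt (bitmap_int : Int) : String :=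
  -- rev = format(bitmap_int & ((1 << 64) - 1), '064b')[::-1].replace('0', '.')   ([::-1] = reverse)
  let rev : List Char := ((pvBin64 (PySem.Int.band bitmap_int (2^64 - 1)).toNat).reverse).map pvTr
  -- ' '.join(rev[i:i + 8] for i in range(0, 64, 8))
  PySem.Str.join " " ((PySem.List.pyRange 0 64 8).map (fun i =>
    String.ofList (PySem.List.slice rev (some i) (some (i + 8)))))

-- ===== PRECONDITION & SPEC =====
def Spec_format_bitmap_py (bitmap_int : Int) (out : String) : Prop := out = format_bitmap_py_alt bitmap_int
instance (bitmap_int : Int) (out : String) : Decidable (Spec_format_bitmap_py bitmap_int out) := by unfold Spec_format_bitmap_py; infer_instance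

-- ===== CLAIM (what is proved, stated in full; the proofs are below) =====
def Claim_equal_format_bitmap_py : Prop := ∀ (bitmap_int : Int), Dom_format_bitmap_py bitmap_int → Spec_format_bitmap_py bitmap_int (format_bitmap_py bitmap_int)

-- ===== LEMMAS AND PROOFS =====

-- Python's '&' with the mask 2^64 - 1 is reduction mod 2^64 (also for negative ints).
lemma pvMask_eq (x : Int) : PySem.Int.band x (2^64 - 1) = x % (2^64) := by
  have hmask : (0:Int) ≤ 2^64 - 1 := by norm_num
  have ht : ((2:Int)^64 - 1).toNat = 2^64 - 1 := by decide
  have hNn : (2^64 : Nat) = 18446744073709551616 := by norm_num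
  have hN : ((2:Int)^64) = 18446744073709551616 := by norm_num
  unfold PySem.Int.band
  by_cases hx : 0 ≤ x
  · rw [if_pos hx, if_pos hmask, ht, Nat.and_two_pow_sub_one_eq_mod]
    have hx' : (x.toNat : Int) = x := Int.toNat_of_nonneg hx
    rw [hNn, hN]
    omega
  · rw [if_neg hx, if_pos hmask, ht, Nat.land_comm, Nat.and_two_pow_sub_one_eq_mod]
    have hn : ((-x - 1).toNat : Int) = -x - 1 := Int.toNat_of_nonneg (by omega)
    rw [hNn, hN]
    omega

-- Reducing mod 2^64 does not change bit i for i < 64.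
lemma pvDiv_emod (x : Int) (i : Nat) (h : i < 64) :
    x / 2^i % 2 = (x % 2^64) / 2^i % 2 := by
  have hne : ((2:Int)^i) ≠ 0 := by positivity
  have h1 : (2:Int)^64 = 2^i * (2 * 2^(63 - i)) := by
    have e : i + (1 + (63 - i)) = 64 := by omega
    calc (2:Int)^64 = 2^(i + (1 + (63 - i))) := by rw [e]
      _ = 2^i * (2 * 2^(63 - i)) := by rw [pow_add, pow_add, pow_one]
  have hd : x = x % 2^64 + 2^i * (2 * (2^(63 - i) * (x / 2^64))) := by
    have h3 := Int.emod_add_ediv x (2^64)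
    have h4 : (2:Int)^i * (2 * (2^(63 - i) * (x / 2^64))) = (2^i * (2 * 2^(63 - i))) * (x / 2^64) := by
      ring
    rw [h4, ← h1]
    linarith
  conv_lhs => rw [hd]
  rw [Int.add_mul_ediv_left _ _ hne, Int.add_mul_emod_self_left]

-- The character A emits for bit i equals character i of B's reversed, dot-translated string.
lemma pvChar_eq (x : Int) (i : Nat) (h : i < 64) :
    (if PySem.Int.band (x >>> i) 1 ≠ 0 then '1' else '.')
      = pvTr (if (PySem.Int.band x (2^64 - 1)).toNat.testBit i then '1' else '0') := by
  rw [pvMask_eq, PySem.Int.band_one]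
  have hm : (0:Int) ≤ x % 2^64 := Int.emod_nonneg x (by positivity)
  have hmod2 : PySem.Int.mod (x >>> i) 2 = x / 2^i % 2 := by
    unfold PySem.Int.mod
    rw [Int.shiftRight_eq_div_pow, Int.fmod_eq_emod, if_pos (Or.inl (by norm_num)), add_zero]
    push_cast
    ring
  have hcast : (((x % 2^64).toNat / 2^i % 2 : Nat) : Int) = (x % 2^64) / 2^i % 2 := by
    conv_rhs => rw [← Int.toNat_of_nonneg hm]
    push_cast
    ring
  rw [hmod2, pvDiv_emod x i h, Nat.testBit_eq_decide_div_mod_eq]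
  have hb2 : (x % 2^64).toNat / 2^i % 2 = 0 ∨ (x % 2^64).toNat / 2^i % 2 = 1 := by omega
  rcases hb2 with hb | hb
  · have hv : (x % 2^64) / 2^i % 2 = 0 := by rw [← hcast, hb]; rfl
    simp only [hv, hb]
    decide
  · have hv : (x % 2^64) / 2^i % 2 = 1 := by rw [← hcast, hb]; rfl
    simp only [hv, hb]
    decide

-- Both ports evaluated to the same explicit 71-character shape (literal reduction of the loops).
set_option maxHeartbeats 2000000 in
lemma pvA_eval (x : Int) : format_bitmap_py x = String.ofList
    [(if PySem.Int.band (x >>> (0 : Nat)) 1 ≠ 0 then '1' else '.'),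
      (if PySem.Int.band (x >>> (1 : Nat)) 1 ≠ 0 then '1' else '.'),
      (if PySem.Int.band (x >>> (2 : Nat)) 1 ≠ 0 then '1' else '.'),
      (if PySem.Int.band (x >>> (3 : Nat)) 1 ≠ 0 then '1' else '.'),
      (if PySem.Int.band (x >>> (4 : Nat)) 1 ≠ 0 then '1' else '.'),
      (if PySem.Int.band (x >>> (5 : Nat)) 1 ≠ 0 then '1' else '.'),
      (if PySem.Int.band (x >>> (6 : Nat)) 1 ≠ 0 then '1' else '.'),
      (if PySem.Int.band (x >>> (7 : Nat)) 1 ≠ 0 then '1' else '.'),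
      ' ',
      (if PySem.Int.band (x >>> (8 : Nat)) 1 ≠ 0 then '1' else '.'),
      (if PySem.Int.band (x >>> (9 : Nat)) 1 ≠ 0 then '1' else '.'),
      (if PySem.Int.band (x >>> (10 : Nat)) 1 ≠ 0 then '1' else '.'),
      (if PySem.Int.band (x >>> (11 : Nat)) 1 ≠ 0 then '1' else '.'),
      (if PySem.Int.band (x >>> (12 : Nat)) 1 ≠ 0 then '1' else '.'),
      (if PySem.Int.band (x >>> (13 : Nat)) 1 ≠ 0 then '1' else '.'),
      (if PySem.Int.band (x >>> (14 : Nat)) 1 ≠ 0 then '1' else '.'),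
      (if PySem.Int.band (x >>> (15 : Nat)) 1 ≠ 0 then '1' else '.'),
      ' ',
      (if PySem.Int.band (x >>> (16 : Nat)) 1 ≠ 0 then '1' else '.'),
      (if PySem.Int.band (x >>> (17 : Nat)) 1 ≠ 0 then '1' else '.'),
      (if PySem.Int.band (x >>> (18 : Nat)) 1 ≠ 0 then '1' else '.'),
      (if PySem.Int.band (x >>> (19 : Nat)) 1 ≠ 0 then '1' else '.'),
      (if PySem.Int.band (x >>> (20 : Nat)) 1 ≠ 0 then '1' else '.'),
      (if PySem.Int.band (x >>> (21 : Nat)) 1 ≠ 0 then '1' else '.'),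
      (if PySem.Int.band (x >>> (22 : Nat)) 1 ≠ 0 then '1' else '.'),
      (if PySem.Int.band (x >>> (23 : Nat)) 1 ≠ 0 then '1' else '.'),
      ' ',
      (if PySem.Int.band (x >>> (24 : Nat)) 1 ≠ 0 then '1' else '.'),
      (if PySem.Int.band (x >>> (25 : Nat)) 1 ≠ 0 then '1' else '.'),
      (if PySem.Int.band (x >>> (26 : Nat)) 1 ≠ 0 then '1' else '.'),
      (if PySem.Int.band (x >>> (27 : Nat)) 1 ≠ 0 then '1' else '.'),
      (if PySem.Int.band (x >>> (28 : Nat)) 1 ≠ 0 then '1' else '.'),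
      (if PySem.Int.band (x >>> (29 : Nat)) 1 ≠ 0 then '1' else '.'),
      (if PySem.Int.band (x >>> (30 : Nat)) 1 ≠ 0 then '1' else '.'),
      (if PySem.Int.band (x >>> (31 : Nat)) 1 ≠ 0 then '1' else '.'),
      ' ',
      (if PySem.Int.band (x >>> (32 : Nat)) 1 ≠ 0 then '1' else '.'),
      (if PySem.Int.band (x >>> (33 : Nat)) 1 ≠ 0 then '1' else '.'),
      (if PySem.Int.band (x >>> (34 : Nat)) 1 ≠ 0 then '1' else '.'),
      (if PySem.Int.band (x >>> (35 : Nat)) 1 ≠ 0 then '1' else '.'),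
      (if PySem.Int.band (x >>> (36 : Nat)) 1 ≠ 0 then '1' else '.'),
      (if PySem.Int.band (x >>> (37 : Nat)) 1 ≠ 0 then '1' else '.'),
      (if PySem.Int.band (x >>> (38 : Nat)) 1 ≠ 0 then '1' else '.'),
      (if PySem.Int.band (x >>> (39 : Nat)) 1 ≠ 0 then '1' else '.'),
      ' ',
      (if PySem.Int.band (x >>> (40 : Nat)) 1 ≠ 0 then '1' else '.'),
      (if PySem.Int.band (x >>> (41 : Nat)) 1 ≠ 0 then '1' else '.'),
      (if PySem.Int.band (x >>> (42 : Nat)) 1 ≠ 0 then '1' else '.'),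
      (if PySem.Int.band (x >>> (43 : Nat)) 1 ≠ 0 then '1' else '.'),
      (if PySem.Int.band (x >>> (44 : Nat)) 1 ≠ 0 then '1' else '.'),
      (if PySem.Int.band (x >>> (45 : Nat)) 1 ≠ 0 then '1' else '.'),
      (if PySem.Int.band (x >>> (46 : Nat)) 1 ≠ 0 then '1' else '.'),
      (if PySem.Int.band (x >>> (47 : Nat)) 1 ≠ 0 then '1' else '.'),
      ' ',
      (if PySem.Int.band (x >>> (48 : Nat)) 1 ≠ 0 then '1' else '.'),
      (if PySem.Int.band (x >>> (49 : Nat)) 1 ≠ 0 then '1' else '.'),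
      (if PySem.Int.band (x >>> (50 : Nat)) 1 ≠ 0 then '1' else '.'),
      (if PySem.Int.band (x >>> (51 : Nat)) 1 ≠ 0 then '1' else '.'),
      (if PySem.Int.band (x >>> (52 : Nat)) 1 ≠ 0 then '1' else '.'),
      (if PySem.Int.band (x >>> (53 : Nat)) 1 ≠ 0 then '1' else '.'),
      (if PySem.Int.band (x >>> (54 : Nat)) 1 ≠ 0 then '1' else '.'),
      (if PySem.Int.band (x >>> (55 : Nat)) 1 ≠ 0 then '1' else '.'),
      ' ',
      (if PySem.Int.band (x >>> (56 : Nat)) 1 ≠ 0 then '1' else '.'),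
      (if PySem.Int.band (x >>> (57 : Nat)) 1 ≠ 0 then '1' else '.'),
      (if PySem.Int.band (x >>> (58 : Nat)) 1 ≠ 0 then '1' else '.'),
      (if PySem.Int.band (x >>> (59 : Nat)) 1 ≠ 0 then '1' else '.'),
      (if PySem.Int.band (x >>> (60 : Nat)) 1 ≠ 0 then '1' else '.'),
      (if PySem.Int.band (x >>> (61 : Nat)) 1 ≠ 0 then '1' else '.'),
      (if PySem.Int.band (x >>> (62 : Nat)) 1 ≠ 0 then '1' else '.'),
      (if PySem.Int.band (x >>> (63 : Nat)) 1 ≠ 0 then '1' else '.')] := by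
  have hrange : List.range 64 = [0,1,2,3,4,5,6,7,8,9,10,11,12,13,14,15,16,17,18,19,20,21,22,23,24,25,26,27,28,29,30,31,32,33,34,35,36,37,38,39,40,41,42,43,44,45,46,47,48,49,50,51,52,53,54,55,56,57,58,59,60,61,62,63] := by decide
  simp [format_bitmap_py, hrange]

set_option maxHeartbeats 2000000 in
lemma pvB_eval (x : Int) : format_bitmap_py_alt x = String.ofList
    [(pvTr (if (PySem.Int.band x (2^64 - 1)).toNat.testBit 0 then '1' else '0')),
      (pvTr (if (PySem.Int.band x (2^64 - 1)).toNat.testBit 1 then '1' else '0')),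
      (pvTr (if (PySem.Int.band x (2^64 - 1)).toNat.testBit 2 then '1' else '0')),
      (pvTr (if (PySem.Int.band x (2^64 - 1)).toNat.testBit 3 then '1' else '0')),
      (pvTr (if (PySem.Int.band x (2^64 - 1)).toNat.testBit 4 then '1' else '0')),
      (pvTr (if (PySem.Int.band x (2^64 - 1)).toNat.testBit 5 then '1' else '0')),
      (pvTr (if (PySem.Int.band x (2^64 - 1)).toNat.testBit 6 then '1' else '0')),
      (pvTr (if (PySem.Int.band x (2^64 - 1)).toNat.testBit 7 then '1' else '0')),
      ' ',
      (pvTr (if (PySem.Int.band x (2^64 - 1)).toNat.testBit 8 then '1' else '0')),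
      (pvTr (if (PySem.Int.band x (2^64 - 1)).toNat.testBit 9 then '1' else '0')),
      (pvTr (if (PySem.Int.band x (2^64 - 1)).toNat.testBit 10 then '1' else '0')),
      (pvTr (if (PySem.Int.band x (2^64 - 1)).toNat.testBit 11 then '1' else '0')),
      (pvTr (if (PySem.Int.band x (2^64 - 1)).toNat.testBit 12 then '1' else '0')),
      (pvTr (if (PySem.Int.band x (2^64 - 1)).toNat.testBit 13 then '1' else '0')),
      (pvTr (if (PySem.Int.band x (2^64 - 1)).toNat.testBit 14 then '1' else '0')),
      (pvTr (if (PySem.Int.band x (2^64 - 1)).toNat.testBit 15 then '1' else '0')),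
      ' ',
      (pvTr (if (PySem.Int.band x (2^64 - 1)).toNat.testBit 16 then '1' else '0')),
      (pvTr (if (PySem.Int.band x (2^64 - 1)).toNat.testBit 17 then '1' else '0')),
      (pvTr (if (PySem.Int.band x (2^64 - 1)).toNat.testBit 18 then '1' else '0')),
      (pvTr (if (PySem.Int.band x (2^64 - 1)).toNat.testBit 19 then '1' else '0')),
      (pvTr (if (PySem.Int.band x (2^64 - 1)).toNat.testBit 20 then '1' else '0')),
      (pvTr (if (PySem.Int.band x (2^64 - 1)).toNat.testBit 21 then '1' else '0')),
      (pvTr (if (PySem.Int.band x (2^64 - 1)).toNat.testBit 22 then '1' else '0')),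
      (pvTr (if (PySem.Int.band x (2^64 - 1)).toNat.testBit 23 then '1' else '0')),
      ' ',
      (pvTr (if (PySem.Int.band x (2^64 - 1)).toNat.testBit 24 then '1' else '0')),
      (pvTr (if (PySem.Int.band x (2^64 - 1)).toNat.testBit 25 then '1' else '0')),
      (pvTr (if (PySem.Int.band x (2^64 - 1)).toNat.testBit 26 then '1' else '0')),
      (pvTr (if (PySem.Int.band x (2^64 - 1)).toNat.testBit 27 then '1' else '0')),
      (pvTr (if (PySem.Int.band x (2^64 - 1)).toNat.testBit 28 then '1' else '0')),
      (pvTr (if (PySem.Int.band x (2^64 - 1)).toNat.testBit 29 then '1' else '0')),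
      (pvTr (if (PySem.Int.band x (2^64 - 1)).toNat.testBit 30 then '1' else '0')),
      (pvTr (if (PySem.Int.band x (2^64 - 1)).toNat.testBit 31 then '1' else '0')),
      ' ',
      (pvTr (if (PySem.Int.band x (2^64 - 1)).toNat.testBit 32 then '1' else '0')),
      (pvTr (if (PySem.Int.band x (2^64 - 1)).toNat.testBit 33 then '1' else '0')),
      (pvTr (if (PySem.Int.band x (2^64 - 1)).toNat.testBit 34 then '1' else '0')),
      (pvTr (if (PySem.Int.band x (2^64 - 1)).toNat.testBit 35 then '1' else '0')),
      (pvTr (if (PySem.Int.band x (2^64 - 1)).toNat.testBit 36 then '1' else '0')),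
      (pvTr (if (PySem.Int.band x (2^64 - 1)).toNat.testBit 37 then '1' else '0')),
      (pvTr (if (PySem.Int.band x (2^64 - 1)).toNat.testBit 38 then '1' else '0')),
      (pvTr (if (PySem.Int.band x (2^64 - 1)).toNat.testBit 39 then '1' else '0')),
      ' ',
      (pvTr (if (PySem.Int.band x (2^64 - 1)).toNat.testBit 40 then '1' else '0')),
      (pvTr (if (PySem.Int.band x (2^64 - 1)).toNat.testBit 41 then '1' else '0')),
      (pvTr (if (PySem.Int.band x (2^64 - 1)).toNat.testBit 42 then '1' else '0')),
      (pvTr (if (PySem.Int.band x (2^64 - 1)).toNat.testBit 43 then '1' else '0')),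
      (pvTr (if (PySem.Int.band x (2^64 - 1)).toNat.testBit 44 then '1' else '0')),
      (pvTr (if (PySem.Int.band x (2^64 - 1)).toNat.testBit 45 then '1' else '0')),
      (pvTr (if (PySem.Int.band x (2^64 - 1)).toNat.testBit 46 then '1' else '0')),
      (pvTr (if (PySem.Int.band x (2^64 - 1)).toNat.testBit 47 then '1' else '0')),
      ' ',
      (pvTr (if (PySem.Int.band x (2^64 - 1)).toNat.testBit 48 then '1' else '0')),
      (pvTr (if (PySem.Int.band x (2^64 - 1)).toNat.testBit 49 then '1' else '0')),
      (pvTr (if (PySem.Int.band x (2^64 - 1)).toNat.testBit 50 then '1' else '0')),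
      (pvTr (if (PySem.Int.band x (2^64 - 1)).toNat.testBit 51 then '1' else '0')),
      (pvTr (if (PySem.Int.band x (2^64 - 1)).toNat.testBit 52 then '1' else '0')),
      (pvTr (if (PySem.Int.band x (2^64 - 1)).toNat.testBit 53 then '1' else '0')),
      (pvTr (if (PySem.Int.band x (2^64 - 1)).toNat.testBit 54 then '1' else '0')),
      (pvTr (if (PySem.Int.band x (2^64 - 1)).toNat.testBit 55 then '1' else '0')),
      ' ',
      (pvTr (if (PySem.Int.band x (2^64 - 1)).toNat.testBit 56 then '1' else '0')),
      (pvTr (if (PySem.Int.band x (2^64 - 1)).toNat.testBit 57 then '1' else '0')),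
      (pvTr (if (PySem.Int.band x (2^64 - 1)).toNat.testBit 58 then '1' else '0')),
      (pvTr (if (PySem.Int.band x (2^64 - 1)).toNat.testBit 59 then '1' else '0')),
      (pvTr (if (PySem.Int.band x (2^64 - 1)).toNat.testBit 60 then '1' else '0')),
      (pvTr (if (PySem.Int.band x (2^64 - 1)).toNat.testBit 61 then '1' else '0')),
      (pvTr (if (PySem.Int.band x (2^64 - 1)).toNat.testBit 62 then '1' else '0')),
      (pvTr (if (PySem.Int.band x (2^64 - 1)).toNat.testBit 63 then '1' else '0'))] := by
  have hrange : List.range 64 = [0,1,2,3,4,5,6,7,8,9,10,11,12,13,14,15,16,17,18,19,20,21,22,23,24,25,26,27,28,29,30,31,32,33,34,35,36,37,38,39,40,41,42,43,44,45,46,47,48,49,50,51,52,53,54,55,56,57,58,59,60,61,62,63] := by decide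
  have hpr : PySem.List.pyRange 0 64 8 = [0, 8, 16, 24, 32, 40, 48, 56] := by decide
  simp [format_bitmap_py_alt, pvBin64, hrange, hpr, PySem.List.slice, PySem.List.clampIdx,
    PySem.Str.join, PySem.Chars.join_cons_cons, PySem.Chars.join_singleton]
  rfl

-- ===== VERDICT (by name: the statement is the Claim_ definition above) =====
set_option maxHeartbeats 2000000 in
theorem format_bitmap_py_spec : Claim_equal_format_bitmap_py := by
  intro x _
  unfold Spec_format_bitmap_py
  have hpoint : ∀ (i : Nat), i < 64 →
      (if PySem.Int.band (x >>> i) 1 ≠ 0 then '1' else '.')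
        = pvTr (if (PySem.Int.band x (2^64 - 1)).toNat.testBit i then '1' else '0') := pvChar_eq x
  rw [pvA_eval, pvB_eval]
  rw [hpoint 0 (by norm_num),
    hpoint 1 (by norm_num),
    hpoint 2 (by norm_num),
    hpoint 3 (by norm_num),
    hpoint 4 (by norm_num),
    hpoint 5 (by norm_num),
    hpoint 6 (by norm_num),
    hpoint 7 (by norm_num),
    hpoint 8 (by norm_num),
    hpoint 9 (by norm_num),
    hpoint 10 (by norm_num),
    hpoint 11 (by norm_num),
    hpoint 12 (by norm_num),
    hpoint 13 (by norm_num),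
    hpoint 14 (by norm_num),
    hpoint 15 (by norm_num),
    hpoint 16 (by norm_num),
    hpoint 17 (by norm_num),
    hpoint 18 (by norm_num),
    hpoint 19 (by norm_num),
    hpoint 20 (by norm_num),
    hpoint 21 (by norm_num),
    hpoint 22 (by norm_num),
    hpoint 23 (by norm_num),
    hpoint 24 (by norm_num),
    hpoint 25 (by norm_num),
    hpoint 26 (by norm_num),
    hpoint 27 (by norm_num),
    hpoint 28 (by norm_num),
    hpoint 29 (by norm_num),
    hpoint 30 (by norm_num),
    hpoint 31 (by norm_num),
    hpoint 32 (by norm_num),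
    hpoint 33 (by norm_num),
    hpoint 34 (by norm_num),
    hpoint 35 (by norm_num),
    hpoint 36 (by norm_num),
    hpoint 37 (by norm_num),
    hpoint 38 (by norm_num),
    hpoint 39 (by norm_num),
    hpoint 40 (by norm_num),
    hpoint 41 (by norm_num),
    hpoint 42 (by norm_num),
    hpoint 43 (by norm_num),
    hpoint 44 (by norm_num),
    hpoint 45 (by norm_num),
    hpoint 46 (by norm_num),
    hpoint 47 (by norm_num),
    hpoint 48 (by norm_num),
    hpoint 49 (by norm_num),
    hpoint 50 (by norm_num),
    hpoint 51 (by norm_num),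
    hpoint 52 (by norm_num),
    hpoint 53 (by norm_num),
    hpoint 54 (by norm_num),
    hpoint 55 (by norm_num),
    hpoint 56 (by norm_num),
    hpoint 57 (by norm_num),
    hpoint 58 (by norm_num),
    hpoint 59 (by norm_num),
    hpoint 60 (by norm_num),
    hpoint 61 (by norm_num),
    hpoint 62 (by norm_num),
    hpoint 63 (by norm_num)]
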